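-- pv_equiv track=rewrite | github.com/msnidal/aoc2022 | day23/life.py | propose_moves
-- ===== SOURCE A (Python) =====
-- DIRECTIONS = [(0, -1), (0, 1), (-1, 0), (1, 0)]
--
-- def surrounding_tiles(tile):
--     return {
--         (x, y): (tile[0] + x, tile[1] + y)
--         for x in range(-1, 2)
--         for y in range(-1, 2)
--         if (x, y) != (0, 0)
--     }
--
-- def propose_moves(elves, offset=0):
--     proposed_moves = {}
--     for elf in elves:
--         adjacent = surrounding_tiles(elf)
--         if len(set(adjacent.values()) & elves) == 0:  # By their lonesome
--             continue
--         else: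
--             hits = [
--                 direction
--                 for surrounding_tile in adjacent
--                 if adjacent[surrounding_tile] in elves
--                 for direction in DIRECTIONS
--                 if (direction[0] != 0 and direction[0] == surrounding_tile[0])
--                 or (direction[1] != 0 and direction[1] == surrounding_tile[1])
--             ]
--
--             for direction in DIRECTIONS[offset:] + DIRECTIONS[:offset]:
--                 if not direction in hits:
--                     destination = (elf[0] + direction[0], elf[1] + direction[1])
--                     if destination in proposed_moves:
--                         proposed_moves[destination] = None  # Nobody moves here!
--                     else:
--                         proposed_moves[destination] = elf
--                     break  # One proposed move per turn
--
--     return proposed_moves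
-- ===== SOURCE B (Python) =====
-- DIRECTIONS = [(0, -1), (0, 1), (-1, 0), (1, 0)]
--
--
-- def propose_moves(elves, offset=0):
--     proposed = {}
--     for x, y in elves:
--         neighbors = [(x + dx, y + dy)
--                      for dx in (-1, 0, 1) for dy in (-1, 0, 1)
--                      if (dx, dy) != (0, 0)]
--         if not any(n in elves for n in neighbors):
--             continue
--         for dx, dy in DIRECTIONS[offset:] + DIRECTIONS[:offset]:
--             if dx != 0:
--                 trio = [(x + dx, y - 1), (x + dx, y), (x + dx, y + 1)]
--             else:
--                 trio = [(x - 1, y + dy), (x, y + dy), (x + 1, y + dy)]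
--             if all(t not in elves for t in trio):
--                 dest = (x + dx, y + dy)
--                 proposed[dest] = None if dest in proposed else (x, y)
--                 break
--     return proposed
-- ===== Notes on version B (the rewrite author's own statement) =====
-- stated objective: simpler
-- what changed: B drops A's 8-entry offset-to-tile dict, the set-intersection loneliness test and the per-occupied-tile direction-alignment 'hits' list, instead checking directly for each direction (in the same rotated order) whether its three adjacent tiles are free, keeping the skip-if-lonely guard and the conflict/None handling identical.
import Mathlib
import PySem

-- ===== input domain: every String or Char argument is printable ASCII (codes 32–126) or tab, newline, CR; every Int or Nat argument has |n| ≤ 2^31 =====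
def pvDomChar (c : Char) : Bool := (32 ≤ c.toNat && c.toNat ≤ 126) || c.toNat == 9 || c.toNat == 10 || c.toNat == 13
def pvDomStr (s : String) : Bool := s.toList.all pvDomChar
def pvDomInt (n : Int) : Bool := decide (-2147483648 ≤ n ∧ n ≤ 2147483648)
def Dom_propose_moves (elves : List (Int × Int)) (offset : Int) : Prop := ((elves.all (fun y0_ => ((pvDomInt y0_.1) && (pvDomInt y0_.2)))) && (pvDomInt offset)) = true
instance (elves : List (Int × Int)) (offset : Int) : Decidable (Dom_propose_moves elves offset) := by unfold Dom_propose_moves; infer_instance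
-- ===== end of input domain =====

-- B replaces A's 8-entry offset→tile dict, set-intersection loneliness test and per-tile
-- direction-alignment "hits" list by a direct per-direction check that the direction's three
-- adjacent tiles are free (objective: simpler). In Python, `elves` is a set; both ports iterate
-- it in the order of the given list, and the returned dict is order-insensitive as a mapping.

-- ===== PORT A =====
def DIRECTIONS : List (Int × Int) := [(0, -1), (0, 1), (-1, 0), (1, 0)]

-- dict comprehension {(x,y): tile+(x,y) for x in range(-1,2) for y in range(-1,2) if (x,y)!=(0,0)}
def surrounding_tiles (tile : Int × Int) : PySem.Dict (Int × Int) (Int × Int) :=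
  PySem.Dict.ofList
    ((PySem.List.pyRange (-1) 2 1).flatMap (fun x =>
      (PySem.List.pyRange (-1) 2 1).filterMap (fun y =>
        if (x, y) ≠ ((0 : Int), (0 : Int)) then some ((x, y), (tile.1 + x, tile.2 + y)) else none)))

-- the `hits` comprehension: `for surrounding_tile in adjacent … adjacent[surrounding_tile] …`
-- iterates keys and looks each key up, i.e. walks the (key, value) items in insertion order
def hitsA (adjacent : PySem.Dict (Int × Int) (Int × Int)) (elves : List (Int × Int)) :
    List (Int × Int) :=
  adjacent.items.flatMap (fun p =>
    if p.2 ∈ elves then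
      DIRECTIONS.filter (fun d =>
        (decide (d.1 ≠ 0) && decide (d.1 = p.1.1)) || (decide (d.2 ≠ 0) && decide (d.2 = p.1.2)))
    else [])

-- `for direction in DIRECTIONS[offset:] + DIRECTIONS[:offset]: … break`
def proposeLoopA (elf : Int × Int) (hits : List (Int × Int))
    (pm : PySem.Dict (Int × Int) (Option (Int × Int))) :
    List (Int × Int) → PySem.Dict (Int × Int) (Option (Int × Int))
  | [] => pm
  | d :: rest =>
    if d ∈ hits then proposeLoopA elf hits pm rest
    else
      let destination := (elf.1 + d.1, elf.2 + d.2)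
      if pm.contains destination then pm.insert destination none
      else pm.insert destination (some elf)

-- one iteration of `for elf in elves`
def proposeStepA (elves : List (Int × Int)) (offset : Int)
    (pm : PySem.Dict (Int × Int) (Option (Int × Int))) (elf : Int × Int) :
    PySem.Dict (Int × Int) (Option (Int × Int)) :=
  let adjacent := surrounding_tiles elf
  if PySem.Set.len (PySem.Set.inter (PySem.Set.ofList adjacent.values) elves) == 0 then pm
  else
    proposeLoopA elf (hitsA adjacent elves) pm
      (PySem.List.slice DIRECTIONS (some offset) none ++
       PySem.List.slice DIRECTIONS none (some offset))

def propose_moves (elves : List (Int × Int)) (offset : Int) :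
    List (Int × Int × Option (Int × Int)) :=
  ((elves.foldl (proposeStepA elves offset) PySem.Dict.empty).items).map
    (fun p => (p.1.1, p.1.2, p.2))

-- ===== PORT B =====
-- [(x+dx, y+dy) for dx in (-1,0,1) for dy in (-1,0,1) if (dx,dy) != (0,0)]
def neighborsB (x y : Int) : List (Int × Int) :=
  [(-1 : Int), 0, 1].flatMap (fun dx =>
    [(-1 : Int), 0, 1].filterMap (fun dy =>
      if (dx, dy) ≠ ((0 : Int), (0 : Int)) then some (x + dx, y + dy) else none))

def trioB (x y dx dy : Int) : List (Int × Int) :=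
  if dx ≠ 0 then [(x + dx, y - 1), (x + dx, y), (x + dx, y + 1)]
  else [(x - 1, y + dy), (x, y + dy), (x + 1, y + dy)]

def proposeLoopB (elves : List (Int × Int)) (x y : Int)
    (pm : PySem.Dict (Int × Int) (Option (Int × Int))) :
    List (Int × Int) → PySem.Dict (Int × Int) (Option (Int × Int))
  | [] => pm
  | d :: rest =>
    if (trioB x y d.1 d.2).all (fun t => !decide (t ∈ elves)) then
      let dest := (x + d.1, y + d.2)
      pm.insert dest (if pm.contains dest then none else some (x, y))
    else proposeLoopB elves x y pm rest

-- one iteration of B's `for x, y in elves`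
def proposeStepB (elves : List (Int × Int)) (offset : Int)
    (pm : PySem.Dict (Int × Int) (Option (Int × Int))) (elf : Int × Int) :
    PySem.Dict (Int × Int) (Option (Int × Int)) :=
  if (neighborsB elf.1 elf.2).any (fun t => decide (t ∈ elves)) then
    proposeLoopB elves elf.1 elf.2 pm
      (PySem.List.slice DIRECTIONS (some offset) none ++
       PySem.List.slice DIRECTIONS none (some offset))
  else pm

def propose_moves_alt (elves : List (Int × Int)) (offset : Int) :
    List (Int × Int × Option (Int × Int)) :=
  ((elves.foldl (proposeStepB elves offset) PySem.Dict.empty).items).map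
    (fun p => (p.1.1, p.1.2, p.2))

-- ===== PRECONDITION & SPEC =====
def Spec_propose_moves (elves : List (Int × Int)) (offset : Int) (out : List (Int × Int × Option (Int × Int))) : Prop := out = propose_moves_alt elves offset
instance (elves : List (Int × Int)) (offset : Int) (out : List (Int × Int × Option (Int × Int))) : Decidable (Spec_propose_moves elves offset out) := by unfold Spec_propose_moves; infer_instance

-- ===== CLAIM (what is proved, stated in full; the proofs are below) =====
def Claim_equal_propose_moves : Prop := ∀ (elves : List (Int × Int)) (offset : Int), Dom_propose_moves elves offset → Spec_propose_moves elves offset (propose_moves elves offset)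

-- ===== LEMMAS AND PROOFS =====

-- the 8 surrounding offsets/tiles, made explicit (both comprehensions walk x-major, y-minor)
theorem st_items (a b : Int) : (surrounding_tiles (a, b)).items =
    [((-1, -1), (a + -1, b + -1)), ((-1, 0), (a + -1, b + 0)), ((-1, 1), (a + -1, b + 1)),
     ((0, -1), (a + 0, b + -1)), ((0, 1), (a + 0, b + 1)),
     ((1, -1), (a + 1, b + -1)), ((1, 0), (a + 1, b + 0)), ((1, 1), (a + 1, b + 1))] := rfl

theorem st_values (a b : Int) : (surrounding_tiles (a, b)).values = neighborsB a b := rfl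

-- A's loneliness test (empty set-intersection) = B's "no neighbour occupied" test
theorem guard_eq (elves : List (Int × Int)) (a b : Int) :
    (PySem.Set.len (PySem.Set.inter (PySem.Set.ofList (surrounding_tiles (a, b)).values) elves) == 0) =
      !((neighborsB a b).any (fun t => decide (t ∈ elves))) := by
  rw [st_values]
  cases hany : (neighborsB a b).any (fun t => decide (t ∈ elves)) with
  | true =>
    rw [List.any_eq_true] at hany
    obtain ⟨t, ht, hte⟩ := hany
    have hmem : t ∈ PySem.Set.inter (PySem.Set.ofList (neighborsB a b)) elves :=
      (PySem.Set.mem_inter _ _ _).mpr ⟨(PySem.Set.mem_ofList _ _).mpr ht, of_decide_eq_true hte⟩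
    have hne : PySem.Set.inter (PySem.Set.ofList (neighborsB a b)) elves ≠ [] :=
      List.ne_nil_of_mem hmem
    simp [PySem.Set.len, hne]
  | false =>
    rw [List.any_eq_false] at hany
    have hnil : PySem.Set.inter (PySem.Set.ofList (neighborsB a b)) elves = [] := by
      rw [List.eq_nil_iff_forall_not_mem]
      intro x hx
      obtain ⟨hx1, hx2⟩ := (PySem.Set.mem_inter _ _ _).mp hx
      exact absurd (decide_eq_true hx2) (by simpa using hany x ((PySem.Set.mem_ofList _ _).mp hx1))
    simp [hnil, PySem.Set.len]

-- a direction is blocked (∈ hits) iff one of its three adjacent tiles is occupied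
theorem hits_iff (elves : List (Int × Int)) (a b : Int) (d : Int × Int) (hd : d ∈ DIRECTIONS) :
    (d ∈ hitsA (surrounding_tiles (a, b)) elves) ↔
      ¬ ((trioB a b d.1 d.2).all (fun t => !decide (t ∈ elves)) = true) := by
  fin_cases hd <;>
    · simp [hitsA, st_items, trioB, DIRECTIONS, List.mem_ite_nil_right, ← sub_eq_add_neg]
      tauto

theorem loop_eq (elves : List (Int × Int)) (a b : Int)
    (pm : PySem.Dict (Int × Int) (Option (Int × Int))) (l : List (Int × Int))
    (hl : ∀ d ∈ l, d ∈ DIRECTIONS) :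
    proposeLoopA (a, b) (hitsA (surrounding_tiles (a, b)) elves) pm l =
      proposeLoopB elves a b pm l := by
  induction l with
  | nil => rfl
  | cons d rest ih =>
    have hd : d ∈ DIRECTIONS := hl d (List.mem_cons_self ..)
    rw [proposeLoopA, proposeLoopB]
    by_cases h : d ∈ hitsA (surrounding_tiles (a, b)) elves
    · rw [if_pos h, ih (fun x hx => hl x (List.mem_cons_of_mem _ hx))]
      rw [if_neg ((hits_iff elves a b d hd).mp h)]
    · have hall : ((trioB a b d.1 d.2).all fun t => !decide (t ∈ elves)) = true := by
        by_contra hc; exact h ((hits_iff elves a b d hd).mpr hc)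
      rw [if_neg h, if_pos hall]
      by_cases hc : pm.contains (a + d.1, b + d.2) = true <;> simp [hc]

theorem step_eq (elves : List (Int × Int)) (offset : Int)
    (pm : PySem.Dict (Int × Int) (Option (Int × Int))) (elf : Int × Int) :
    proposeStepA elves offset pm elf = proposeStepB elves offset pm elf := by
  obtain ⟨a, b⟩ := elf
  unfold proposeStepA proposeStepB
  simp only [guard_eq]
  by_cases h : (neighborsB a b).any (fun t => decide (t ∈ elves)) = true
  · simp only [h, Bool.not_true, if_pos]
    rw [if_neg (by simp)]
    exact loop_eq elves a b pm _ (fun d hd => by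
      rcases List.mem_append.mp hd with h' | h' <;>
        exact PySem.List.mem_of_mem_slice _ _ _ h')
  · simp only [Bool.not_eq_true] at h
    simp [h]

-- ===== VERDICT (by name: the statement is the Claim_ definition above) =====
theorem propose_moves_spec : Claim_equal_propose_moves := by
  intro elves offset _
  unfold Spec_propose_moves propose_moves propose_moves_alt
  rw [show proposeStepA elves offset = proposeStepB elves offset from
    funext fun pm => funext fun elf => step_eq elves offset pm elf]
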